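-- pv_equiv track=rewrite | github.com/Ndmjohansen/KlatreBot_Public | klatrebot_v2/cogs/chat.py | _strip_fast_flag
-- ===== SOURCE A (Python) =====
-- def _strip_fast_flag(question: str) -> tuple[str, bool]:
--     """Strip a single --fast flag. Returns (cleaned, force_chat)."""
--     parts = question.split()
--     keep: list[str] = []
--     force_chat = False
--     for p in parts:
--         if p == "--fast" and not force_chat:
--             force_chat = True
--         else:
--             keep.append(p)
--     return " ".join(keep), force_chat
-- ===== SOURCE B (Python) =====
-- def _strip_fast_flag(question: str) -> tuple[str, bool]:
--     """Strip a single --fast flag. Returns (cleaned, force_chat)."""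
--     parts = question.split()
--     if "--fast" in parts:
--         i = parts.index("--fast")
--         return " ".join(parts[:i] + parts[i + 1:]), True
--     return " ".join(parts), False
-- ===== Notes on version B (the rewrite author's own statement) =====
-- stated objective: simpler
-- what changed: Replaces the stateful filtering loop (keep-list plus force_chat flag) with a membership test, index of the first --fast token, and a slice-and-concat rebuild around it.
import Mathlib
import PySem

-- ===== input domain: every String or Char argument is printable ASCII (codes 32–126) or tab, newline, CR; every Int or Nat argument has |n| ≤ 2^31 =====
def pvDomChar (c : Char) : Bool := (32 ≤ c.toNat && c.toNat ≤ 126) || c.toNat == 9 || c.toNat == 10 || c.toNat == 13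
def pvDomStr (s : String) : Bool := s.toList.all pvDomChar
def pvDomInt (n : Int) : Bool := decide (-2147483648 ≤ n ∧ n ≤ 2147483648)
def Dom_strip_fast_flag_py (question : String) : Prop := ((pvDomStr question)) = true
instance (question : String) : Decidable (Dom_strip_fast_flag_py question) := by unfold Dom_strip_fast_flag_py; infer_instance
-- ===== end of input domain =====

-- B replaces A's stateful filtering loop (keep-list + force_chat flag) with
-- index-of-first-"--fast" and a slice-and-concat rebuild; objective: simpler.


-- ===== PORT A =====
def strip_fast_flag_py (question : String) : String × Bool :=
  let parts := PySem.Str.split₀ question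
  let st := parts.foldl
    (fun (st : List String × Bool) p =>
      if p == "--fast" && !st.2 then (st.1, true) else (st.1 ++ [p], st.2))
    ([], false)
  (PySem.Str.join " " st.1, st.2)

-- ===== PORT B =====
def strip_fast_flag_py_alt (question : String) : String × Bool :=
  let parts := PySem.Str.split₀ question
  match PySem.List.index? parts "--fast" with
  | some i =>
      (PySem.Str.join " "
        (PySem.List.slice parts none (some (i : Int)) ++
         PySem.List.slice parts (some ((i : Int) + 1)) none), true)
  | none => (PySem.Str.join " " parts, false)

-- ===== PRECONDITION & SPEC =====
def Spec_strip_fast_flag_py (question : String) (out : String × Bool) : Prop := out = strip_fast_flag_py_alt question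
instance (question : String) (out : String × Bool) : Decidable (Spec_strip_fast_flag_py question out) := by unfold Spec_strip_fast_flag_py; infer_instance

-- ===== CLAIM (what is proved, stated in full; the proofs are below) =====
def Claim_equal_strip_fast_flag_py : Prop := ∀ (question : String), Dom_strip_fast_flag_py question → Spec_strip_fast_flag_py question (strip_fast_flag_py question)

-- ===== LEMMAS AND PROOFS =====

-- once the flag is set, the loop just appends every remaining token
theorem pv_fold_true (l : List String) (acc : List String) :
    l.foldl
      (fun (st : List String × Bool) p =>
        if p == "--fast" && !st.2 then (st.1, true) else (st.1 ++ [p], st.2))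
      (acc, true) = (acc ++ l, true) := by
  induction l generalizing acc with
  | nil => simp
  | cons x xs ih =>
    have hstep : (if (x == "--fast" && !((acc, true) : List String × Bool).2) = true
        then (((acc, true) : List String × Bool).1, true)
        else (((acc, true) : List String × Bool).1 ++ [x], ((acc, true) : List String × Bool).2))
        = ((acc ++ [x], true) : List String × Bool) := by simp
    rw [List.foldl_cons, hstep, ih]
    simp

-- A's loop from a clean flag removes exactly the first "--fast"
theorem pv_fold_false (l : List String) (acc : List String) :
    l.foldl
      (fun (st : List String × Bool) p =>
        if p == "--fast" && !st.2 then (st.1, true) else (st.1 ++ [p], st.2))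
      (acc, false) =
    (match PySem.List.index? l "--fast" with
     | some i => (acc ++ l.take i ++ l.drop (i + 1), true)
     | none => (acc ++ l, false)) := by
  induction l generalizing acc with
  | nil => simp [PySem.List.index?]
  | cons x xs ih =>
    by_cases hx : x = "--fast"
    · subst hx
      have hstep : (if ("--fast" == "--fast" && !((acc, false) : List String × Bool).2) = true
          then (((acc, false) : List String × Bool).1, true)
          else (((acc, false) : List String × Bool).1 ++ ["--fast"], ((acc, false) : List String × Bool).2))
          = ((acc, true) : List String × Bool) := by simp
      rw [PySem.List.index?_cons_self, List.foldl_cons, hstep, pv_fold_true]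
      simp
    · have hstep : (if (x == "--fast" && !((acc, false) : List String × Bool).2) = true
          then (((acc, false) : List String × Bool).1, true)
          else (((acc, false) : List String × Bool).1 ++ [x], ((acc, false) : List String × Bool).2))
          = ((acc ++ [x], false) : List String × Bool) := by simp [hx]
      rw [PySem.List.index?_cons_of_ne xs hx, List.foldl_cons, hstep, ih]
      cases h : PySem.List.index? xs "--fast" with
      | none => simp
      | some i => simp

-- ===== VERDICT (by name: the statement is the Claim_ definition above) =====
theorem strip_fast_flag_py_spec : Claim_equal_strip_fast_flag_py := by
  intro question _
  unfold Spec_strip_fast_flag_py strip_fast_flag_py strip_fast_flag_py_alt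
  simp only [pv_fold_false]
  cases h : PySem.List.index? (PySem.Str.split₀ question) "--fast" with
  | none => simp
  | some i =>
    have h1 : PySem.List.slice (PySem.Str.split₀ question) none (some (i : Int)) =
        (PySem.Str.split₀ question).take i := PySem.List.slice_to_natCast _ _
    have h2 : PySem.List.slice (PySem.Str.split₀ question) (some ((i : Int) + 1)) none =
        (PySem.Str.split₀ question).drop (i + 1) := by
      have : ((i : Int) + 1) = ((i + 1 : Nat) : Int) := by push_cast; ring
      rw [this, PySem.List.slice_from_natCast]
    simp [h1, h2]
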